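-- pv_equiv track=rewrite | github.com/sanmasanba/atcoder_codes | 精選100問/動的計画法：区間DP/047.py | func
-- ===== SOURCE A (Python) =====
-- def func(l, r, flag, N, A, dp):
--     # 計算済みなら、メモを返す
--     if dp[l][r] != -1:
--         return dp[l][r]
--     # 最後のひとかけら
--     if l == r:
--         # IOIちゃんの番ならケーキは取れない
--         if flag:
--             dp[l][r] = 0
--         # JOI君の番なら最後のケーキを取る
--         else:
--             dp[l][r] = A[l]
--         return dp[l][r]
--     # IOIちゃんのターン
--     if flag:
--         # 大きいほうを取る
--         if A[l] > A[r]: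
--             dp[l][r] = func((l+1)%N, r, 0, N, A, dp)
--         else:
--             dp[l][r] = func(l, (r+N-1)%N, 0, N, A, dp)
--         return dp[l][r]
--     # JOIくんのターン
--     # 大きいほうを返す
--     dp[l][r] = max(func((l+1)%N, r, 1, N, A, dp)+A[l], func(l, (r+N-1)%N, 1, N, A, dp)+A[r])
--     return dp[l][r]
-- ===== SOURCE B (Python) =====
-- def func(l, r, flag, N, A, dp):
--     # Bottom-up interval DP (no recursion, no memo writes; dp is read-only here:
--     # unlike A, this does not mutate dp -- the equivalence is about the return value).
--     v = dp[l][r]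
--     if v != -1:
--         return v
--     d0 = (r - l) % N
--     # layer for "taken" = d0 (single-piece intervals); flag alternates each level
--     f = flag if d0 % 2 == 0 else not flag
--     layer = []
--     for s in range(d0 + 1):
--         i = (l + s) % N
--         m = dp[i][i]
--         layer.append(m if m != -1 else (0 if f else A[i]))
--     for t in range(d0 - 1, -1, -1):
--         f = not f
--         new = []
--         for s in range(t + 1):
--             i = (l + s) % N
--             j = (r - (t - s)) % N
--             m = dp[i][j]
--             if m != -1:
--                 new.append(m)
--             elif f:
--                 new.append(layer[s + 1] if A[i] > A[j] else layer[s])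
--             else:
--                 new.append(max(layer[s + 1] + A[i], layer[s] + A[j]))
--         layer = new
--     return layer[0]
-- ===== Notes on version B (the rewrite author's own statement) =====
-- stated objective: alternative
-- what changed: Replaces A's top-down memoized recursion (which mutates dp in place) with an iterative bottom-up interval DP that fills one layer of cell values per interval length, alternating the turn flag per layer and honoring both the passed flag and pre-filled dp cells as overrides; B never writes to dp.
-- outside the precondition, e.g. on func(0, -1, False, 3, [0, -3, 8], [[-1, -1, -1], [-1, -1, -1, -1]]): A returns 5, B raises IndexError
import Mathlib
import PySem

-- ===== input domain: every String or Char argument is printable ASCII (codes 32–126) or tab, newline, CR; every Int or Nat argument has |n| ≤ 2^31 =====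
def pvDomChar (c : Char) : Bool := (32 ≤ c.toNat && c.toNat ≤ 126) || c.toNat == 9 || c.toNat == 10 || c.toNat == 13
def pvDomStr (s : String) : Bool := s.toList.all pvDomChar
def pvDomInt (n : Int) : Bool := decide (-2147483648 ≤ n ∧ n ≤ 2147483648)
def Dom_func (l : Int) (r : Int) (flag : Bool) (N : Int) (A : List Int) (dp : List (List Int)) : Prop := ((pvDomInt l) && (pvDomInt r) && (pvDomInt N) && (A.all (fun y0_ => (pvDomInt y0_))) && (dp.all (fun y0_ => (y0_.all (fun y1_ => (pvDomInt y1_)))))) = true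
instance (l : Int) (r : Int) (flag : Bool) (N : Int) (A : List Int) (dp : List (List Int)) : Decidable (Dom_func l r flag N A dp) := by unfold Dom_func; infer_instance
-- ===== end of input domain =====

-- B replaces A's top-down memoized recursion by a bottom-up layer-by-layer table fill (no recursion).
-- NOTE: A mutates its argument dp in place (memo writes); B reads dp but never writes it —
-- the equivalence proved here is about the RETURN value only.

-- ===== PORT A =====
-- dp[i][j] = v  (none = IndexError)
def setCell (dp : List (List Int)) (i j v : Int) : Option (List (List Int)) :=
  match PySem.List.pyGet? dp i with
  | none => none
  | some row =>
    match PySem.List.pySet? row j v with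
    | none => none
    | some row' => PySem.List.pySet? dp i row'

-- fuel-bounded transliteration of A's recursion; none = a Python exception (or fuel
-- exhaustion, which never happens for fuel > (r-l) mod N: see the proofs below)
def funcAux : Nat → Int → Int → Bool → Int → List Int → List (List Int) → Option (Int × List (List Int))
  | 0, _, _, _, _, _, _ => none
  | fuel+1, l, r, flag, N, A, dp =>
    match PySem.List.pyGet? dp l with
    | none => none
    | some row =>
    match PySem.List.pyGet? row r with
    | none => none
    | some v =>
    if v ≠ -1 then some (v, dp)
    else if l = r then
      (if flag then
        (setCell dp l r 0).map (fun dp' => ((0 : Int), dp'))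
      else
        match PySem.List.pyGet? A l with
        | none => none
        | some a => (setCell dp l r a).map (fun dp' => (a, dp')))
    else if flag then
      match PySem.List.pyGet? A l, PySem.List.pyGet? A r with
      | some al, some ar =>
        if al > ar then
          match PySem.Int.mod? (l+1) N with
          | none => none
          | some l' =>
            match funcAux fuel l' r false N A dp with
            | none => none
            | some (w, dp1) => (setCell dp1 l r w).map (fun dp2 => (w, dp2))
        else
          match PySem.Int.mod? (r+N-1) N with
          | none => none
          | some r' =>
            match funcAux fuel l r' false N A dp with
            | none => none
            | some (w, dp1) => (setCell dp1 l r w).map (fun dp2 => (w, dp2))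
      | _, _ => none
    else
      match PySem.Int.mod? (l+1) N with
      | none => none
      | some l' =>
      match funcAux fuel l' r true N A dp with
      | none => none
      | some (w1, dp1) =>
      match PySem.List.pyGet? A l with
      | none => none
      | some al =>
      match PySem.Int.mod? (r+N-1) N with
      | none => none
      | some r' =>
      match funcAux fuel l r' true N A dp1 with
      | none => none
      | some (w2, dp2) =>
      match PySem.List.pyGet? A r with
      | none => none
      | some ar =>
        (setCell dp2 l r (max (w1+al) (w2+ar))).map (fun dp3 => (max (w1+al) (w2+ar), dp3))

def func (l : Int) (r : Int) (flag : Bool) (N : Int) (A : List Int) (dp : List (List Int)) : Int :=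
  match funcAux (2 * N.natAbs + dp.length + 8) l r flag N A dp with
  | some p => p.1
  | none => 0

-- ===== PORT B =====
-- dp[i][j] read with Python indexing (total form; out-of-range = junk 0, excluded by Pre_)
def cellD (dp : List (List Int)) (i j : Int) : Int :=
  PySem.List.pyGetD (PySem.List.pyGetD dp i ([] : List Int)) j 0

-- one bottom-up step: from the layer for `taken = t+1` to the layer for `taken = t`
def stepLayer (l r N : Int) (A : List Int) (dp : List (List Int)) (t : Nat) (f : Bool)
    (layer : List Int) : List Int :=
  (List.range (t+1)).map (fun (s : Nat) =>
    let i := PySem.Int.mod (l + (s : Int)) N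
    let j := PySem.Int.mod (r - ((t : Int) - (s : Int))) N
    let m := cellD dp i j
    if m ≠ -1 then m
    else if f then
      (if PySem.List.pyGetD A i 0 > PySem.List.pyGetD A j 0 then layer.getD (s+1) 0
       else layer.getD s 0)
    else
      max (layer.getD (s+1) 0 + PySem.List.pyGetD A i 0)
          (layer.getD s 0 + PySem.List.pyGetD A j 0))

-- the loop `for t in range(d0-1, -1, -1)` of Source B, flag alternating each level
def downLoop (l r N : Int) (A : List Int) (dp : List (List Int)) : Nat → Bool → List Int → List Int
  | 0, _, layer => layer
  | t+1, f, layer => downLoop l r N A dp t (!f) (stepLayer l r N A dp t (!f) layer)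

def func_alt (l : Int) (r : Int) (flag : Bool) (N : Int) (A : List Int) (dp : List (List Int)) : Int :=
  let v := cellD dp l r
  if v ≠ -1 then v
  else
    let d0 : Nat := (PySem.Int.mod (r - l) N).toNat
    let f0 : Bool := if d0 % 2 = 0 then flag else !flag
    let base : List Int := (List.range (d0+1)).map (fun (s : Nat) =>
      let i := PySem.Int.mod (l + (s : Int)) N
      let m := cellD dp i i
      if m ≠ -1 then m else if f0 then 0 else PySem.List.pyGetD A i 0)
    (downLoop l r N A dp d0 f0 base).getD 0 0

-- ===== PRECONDITION & SPEC =====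
-- Pre_ admits (a) any input whose queried cell dp[l][r] is a filled memo cell (both programs
-- just return it), and otherwise (b) the natural domain of this memoized interval DP:
-- 0 < N, l and r canonical indices in [0,N), and A and dp at least N×N in shape.  Outside it
-- A raises (IndexError/ZeroDivisionError/RecursionError) or returns values produced by Python
-- negative-index row aliasing, which B does not reproduce.
def Pre_func (l : Int) (r : Int) (flag : Bool) (N : Int) (A : List Int) (dp : List (List Int)) : Prop :=
  (((PySem.List.pyGet? dp l).bind (fun row => PySem.List.pyGet? row r)).getD (-1) ≠ -1)
  ∨ (0 < N ∧ 0 ≤ l ∧ l < N ∧ 0 ≤ r ∧ r < N ∧ N ≤ (A.length : Int) ∧ N ≤ (dp.length : Int) ∧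
      ∀ row ∈ dp.take N.toNat, N ≤ (row.length : Int))
instance (l : Int) (r : Int) (flag : Bool) (N : Int) (A : List Int) (dp : List (List Int)) : Decidable (Pre_func l r flag N A dp) := by unfold Pre_func; infer_instance

def pvWitness_func : Int × Int × Bool × Int × List Int × List (List Int) :=
  (0, 1, false, 2, [3, 5], [[-1, -1], [-1, -1]])

def Spec_func (l : Int) (r : Int) (flag : Bool) (N : Int) (A : List Int) (dp : List (List Int)) (out : Int) : Prop := out = func_alt l r flag N A dp
instance (l : Int) (r : Int) (flag : Bool) (N : Int) (A : List Int) (dp : List (List Int)) (out : Int) : Decidable (Spec_func l r flag N A dp out) := by unfold Spec_func; infer_instance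

-- ===== CLAIM (what is proved, stated in full; the proofs are below) =====
def Claim_equal_func : Prop := ∀ (l : Int) (r : Int) (flag : Bool) (N : Int) (A : List Int) (dp : List (List Int)), Dom_func l r flag N A dp → Pre_func l r flag N A dp → Spec_func l r flag N A dp (func l r flag N A dp)

-- ===== LEMMAS AND PROOFS =====

-- the flag after `t` alternations starting from `f`
def pvFlagAt (f : Bool) (t : Nat) : Bool := if t % 2 = 0 then f else !f

-- the pure (memo-free) value of the game on the interval cell (i, j) at distance k = (j-i) mod N,
-- reading only the ORIGINAL dp0 as an override table
def pureV (N : Int) (A : List Int) (dp0 : List (List Int)) : Nat → Int → Int → Bool → Int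
  | 0, i, j, f =>
    let m := cellD dp0 i j
    if m ≠ -1 then m else if f then 0 else PySem.List.pyGetD A i 0
  | k+1, i, j, f =>
    let m := cellD dp0 i j
    if m ≠ -1 then m
    else if f then
      (if PySem.List.pyGetD A i 0 > PySem.List.pyGetD A j 0 then
        pureV N A dp0 k (PySem.Int.mod (i+1) N) j false
      else
        pureV N A dp0 k i (PySem.Int.mod (j+N-1) N) false)
    else
      max (pureV N A dp0 k (PySem.Int.mod (i+1) N) j true + PySem.List.pyGetD A i 0)
          (pureV N A dp0 k i (PySem.Int.mod (j+N-1) N) true + PySem.List.pyGetD A j 0)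

-- invariant on the mutated dp during A's recursion, relative to the original dp0:
-- shape unchanged, and every in-range cell either still holds its original value or was a -1
-- cell now holding its pure value for its parity-canonical flag
def DpInv (dp0 : List (List Int)) (N : Int) (A : List Int) (c : Bool) (dpc : List (List Int)) : Prop :=
  dpc.map List.length = dp0.map List.length ∧
  ∀ i j : Int, 0 ≤ i → i < N → 0 ≤ j → j < N →
    cellD dpc i j = cellD dp0 i j ∨
    (cellD dp0 i j = -1 ∧
      cellD dpc i j = pureV N A dp0 (((j - i) % N).toNat) i j (pvFlagAt c (((j - i) % N).toNat)))

lemma pyGet?_nonneg {α : Type} (xs : List α) (i : Int) (h0 : 0 ≤ i) :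
    PySem.List.pyGet? xs i = xs[i.toNat]? := by
  simp [PySem.List.pyGet?, PySem.List.pyIdx?, h0]
  split
  · rfl
  · simp; omega

lemma pyGetD_nonneg {α : Type} (xs : List α) (i : Int) (d : α) (h0 : 0 ≤ i) :
    PySem.List.pyGetD xs i d = (xs[i.toNat]?).getD d := by
  rw [PySem.List.pyGetD, pyGet?_nonneg xs i h0]

lemma pySet?_nonneg {α : Type} (xs : List α) (i : Int) (v : α) (h0 : 0 ≤ i)
    (h1 : i < (xs.length : Int)) :
    PySem.List.pySet? xs i v = some (xs.set i.toNat v) := by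
  have : i = ((i.toNat : Nat) : Int) := by omega
  rw [this, PySem.List.pySet?_natCast _ _ _ (by omega)]
  simp only [Int.toNat_natCast]

lemma setCell_spec (dpc : List (List Int)) (i j v : Int)
    (hi0 : 0 ≤ i) (hi : i < (dpc.length : Int)) (hj0 : 0 ≤ j)
    (hj : j < ((dpc.getD i.toNat ([] : List Int)).length : Int)) :
    ∃ dp', setCell dpc i j v = some dp' ∧
      dp'.map List.length = dpc.map List.length ∧
      ∀ i' j' : Int, 0 ≤ i' → 0 ≤ j' →
        cellD dp' i' j' = if i' = i ∧ j' = j then v else cellD dpc i' j' := by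
  have hiN : i.toNat < dpc.length := by omega
  have hrow : dpc[i.toNat]? = some dpc[i.toNat] := List.getElem?_eq_getElem hiN
  have hjN : j.toNat < dpc[i.toNat].length := by
    rw [List.getD_eq_getElem?_getD, List.getElem?_eq_getElem hiN] at hj
    simp at hj; omega
  refine ⟨dpc.set i.toNat (dpc[i.toNat].set j.toNat v), ?_, ?_, ?_⟩
  · rw [setCell, pyGet?_nonneg _ _ hi0, hrow]
    have e1 := pySet?_nonneg (dpc[i.toNat]) j v hj0 (by omega)
    have e2 := pySet?_nonneg dpc i (dpc[i.toNat].set j.toNat v) hi0 hi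
    simp [e1, e2]
  · rw [List.map_set]
    apply List.ext_getElem?
    intro n
    rw [List.getElem?_set]
    split
    · rename_i hn; subst hn; simp [hiN]
    · rfl
  · intro i' j' h0 h1
    by_cases hii : i' = i
    · subst hii
      by_cases hjj : j' = j
      · subst hjj
        simp only [cellD, pyGetD_nonneg _ _ _ h0, pyGetD_nonneg _ _ _ h1]
        rw [List.getElem?_set]
        simp [hiN, hjN]
      · have htj : j'.toNat ≠ j.toNat := by omega
        simp only [cellD, pyGetD_nonneg _ _ _ h0, pyGetD_nonneg _ _ _ h1]
        rw [List.getElem?_set]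
        simp [hiN, Ne.symm htj, hjj]
    · have hti : i'.toNat ≠ i.toNat := by omega
      simp only [cellD, pyGetD_nonneg _ _ _ h0, pyGetD_nonneg _ _ _ h1]
      rw [List.getElem?_set]
      simp [Ne.symm hti, hii]


lemma pvFlagAt_succ (f : Bool) (t : Nat) : pvFlagAt f (t+1) = !(pvFlagAt f t) := by
  have h : (t+1) % 2 = if t % 2 = 0 then 1 else 0 := by
    by_cases h : t % 2 = 0 <;> simp [h] <;> omega
  unfold pvFlagAt
  rw [h]
  by_cases h2 : t % 2 = 0 <;> simp [h2]

lemma emod_self_idem (a N : Int) : a % N % N = a % N := Int.emod_emod_of_dvd a dvd_rfl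

lemma emod_add_one (a N : Int) : (a % N + 1) % N = (a + 1) % N := by
  rw [Int.add_emod a 1, Int.add_emod (a % N) 1, emod_self_idem]

lemma emod_sub_one (a N : Int) : (a % N + N - 1) % N = (a - 1) % N := by
  have h : a % N + N - 1 = (a % N - 1) + N * 1 := by ring
  rw [h, Int.add_mul_emod_self_left, Int.sub_emod (a % N) 1, emod_self_idem, ← Int.sub_emod]

-- the layer of pure values for `taken = t` cells, relative to the root query (l, r) at distance d0
def layerFun (N : Int) (A : List Int) (dp : List (List Int)) (l r : Int) (flag : Bool) (d0 t : Nat) : List Int :=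
  (List.range (t+1)).map (fun (s : Nat) =>
    pureV N A dp (d0 - t) ((l + (s : Int)) % N) ((r - ((t : Int) - (s : Int))) % N) (pvFlagAt flag t))

lemma stepLayer_eq (N : Int) (A : List Int) (dp : List (List Int)) (l r : Int) (flag : Bool)
    (hN : 0 < N) (d0 t : Nat) (ht : t < d0) :
    stepLayer l r N A dp t (pvFlagAt flag t) (layerFun N A dp l r flag d0 (t+1)) =
      layerFun N A dp l r flag d0 t := by
  unfold stepLayer layerFun
  apply List.map_congr_left
  intro s hs
  have hst : s ≤ t := by simpa [Nat.lt_succ_iff] using hs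
  simp only [PySem.Int.mod_eq_emod_of_pos hN]
  have hd : d0 - t = (d0 - (t+1)) + 1 := by omega
  have hij : ((l + (s : Int)) % N + 1) % N = (l + ((s : Int) + 1)) % N := by
    rw [emod_add_one]; congr 1; ring
  have hjj : ((r - ((t : Int) - (s : Int))) % N + N - 1) % N = (r - ((t : Int) + 1 - (s : Int))) % N := by
    rw [emod_sub_one]; congr 1; ring
  have hjj2 : (r - ((t : Int) + 1 - ((s : Int) + 1))) % N = (r - ((t : Int) - (s : Int))) % N := by
    congr 1; ring
  rw [hd, pureV]
  simp only [PySem.Int.mod_eq_emod_of_pos hN]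
  by_cases hm : cellD dp ((l + (s : Int)) % N) ((r - ((t : Int) - (s : Int))) % N) = -1
  · simp only [hm]
    rw [PySem.List.getD_map_range _ _ _ _ (by omega : s+1 < t+1+1),
        PySem.List.getD_map_range _ _ _ _ (by omega : s < t+1+1)]
    rw [pvFlagAt_succ]
    push_cast
    rw [hij, hjj, hjj2]
    cases pvFlagAt flag t <;> simp
  · simp [hm]

lemma downLoop_eq (N : Int) (A : List Int) (dp : List (List Int)) (l r : Int) (flag : Bool)
    (hN : 0 < N) (d0 : Nat) :
    ∀ t : Nat, t ≤ d0 →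
      downLoop l r N A dp t (pvFlagAt flag t) (layerFun N A dp l r flag d0 t) =
        layerFun N A dp l r flag d0 0 := by
  intro t
  induction t with
  | zero => intro _; rw [downLoop]
  | succ t ih =>
    intro ht
    rw [downLoop]
    have h1 : (!(pvFlagAt flag (t+1))) = pvFlagAt flag t := by rw [pvFlagAt_succ, Bool.not_not]
    rw [h1, stepLayer_eq N A dp l r flag hN d0 t (by omega)]
    exact ih (by omega)


lemma shape_len {dpc dp0 : List (List Int)} (h : dpc.map List.length = dp0.map List.length) :
    dpc.length = dp0.length := by
  have := congrArg List.length h; simpa using this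

lemma shape_row_len {dpc dp0 : List (List Int)} (h : dpc.map List.length = dp0.map List.length)
    (n : Nat) : (dpc.getD n ([] : List Int)).length = (dp0.getD n ([] : List Int)).length := by
  have h' := congrArg (fun xs => xs[n]?) h
  simp only [List.getElem?_map] at h'
  rw [List.getD_eq_getElem?_getD, List.getD_eq_getElem?_getD]
  rcases h1 : dpc[n]? with _ | row <;> rcases h2 : dp0[n]? with _ | row0 <;>
    rw [h1, h2] at h' <;> simp_all

lemma row_len_ge (N : Int) (dp0 : List (List Int)) (hdp : N ≤ (dp0.length : Int))
    (hrows : ∀ row ∈ dp0.take N.toNat, N ≤ (row.length : Int)) (n : Nat) (hn : (n : Int) < N) :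
    N ≤ (((dp0.getD n ([] : List Int)).length : Int)) := by
  have hn' : n < dp0.length := by omega
  have h1 : n < (dp0.take N.toNat).length := by rw [List.length_take]; omega
  have h2 : (dp0.take N.toNat)[n]'h1 = dp0[n]'hn' := by rw [List.getElem_take]
  have hmem : dp0[n]'hn' ∈ dp0.take N.toNat := by rw [← h2]; exact List.getElem_mem _
  have := hrows _ hmem
  rw [List.getD_eq_getElem?_getD, List.getElem?_eq_getElem hn']
  simpa using this

lemma read_row {dpc : List (List Int)} (i : Int) (h0 : 0 ≤ i) (hi : i.toNat < dpc.length) :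
    PySem.List.pyGet? dpc i = some (dpc.getD i.toNat ([] : List Int)) := by
  rw [pyGet?_nonneg _ _ h0, List.getD_eq_getElem?_getD, List.getElem?_eq_getElem hi]
  simp

lemma read_entry {row : List Int} (j : Int) (h0 : 0 ≤ j) (hj : j.toNat < row.length) :
    PySem.List.pyGet? row j = some (row.getD j.toNat 0) := by
  rw [pyGet?_nonneg _ _ h0, List.getD_eq_getElem?_getD, List.getElem?_eq_getElem hj]
  simp

lemma cellD_eq_getD {dpc : List (List Int)} {i j : Int} (h0 : 0 ≤ i) (h1 : 0 ≤ j) :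
    cellD dpc i j = (dpc.getD i.toNat ([] : List Int)).getD j.toNat 0 := by
  rw [cellD, pyGetD_nonneg _ _ _ h0, pyGetD_nonneg _ _ _ h1, List.getD_eq_getElem?_getD,
    List.getD_eq_getElem?_getD]

lemma readA (A : List Int) (N i : Int) (h0 : 0 ≤ i) (hi : i < N) (hA : N ≤ (A.length : Int)) :
    PySem.List.pyGet? A i = some (PySem.List.pyGetD A i 0) := by
  have hi' : i.toNat < A.length := by omega
  rw [pyGet?_nonneg _ _ h0, pyGetD_nonneg _ _ _ h0, List.getElem?_eq_getElem hi']
  simp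

lemma mod?_pos (a N : Int) (hN : 0 < N) : PySem.Int.mod? a N = some (a % N) := by
  have h1 : PySem.Int.mod? a N = some (PySem.Int.mod a N) := by
    simp [PySem.Int.mod?, PySem.Int.mod, show N ≠ 0 by omega]
  rw [h1, PySem.Int.mod_eq_emod_of_pos hN]

lemma pureV_hit (N : Int) (A : List Int) (dp0 : List (List Int)) (k : Nat) (i j : Int) (f : Bool)
    (h : cellD dp0 i j ≠ -1) : pureV N A dp0 k i j f = cellD dp0 i j := by
  cases k <;> simp [pureV, h]

lemma cell_value_eq {dp0 : List (List Int)} {N : Int} {A : List Int} {c : Bool}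
    {dpc : List (List Int)} {i j : Int} {k : Nat} {f : Bool}
    (hinv : DpInv dp0 N A c dpc) (h0i : 0 ≤ i) (hiN : i < N) (h0j : 0 ≤ j) (hjN : j < N)
    (hk : ((j - i) % N).toNat = k) (hf : f = pvFlagAt c k) :
    cellD dpc i j ≠ -1 → cellD dpc i j = pureV N A dp0 k i j f := by
  intro hne
  rcases hinv.2 i j h0i hiN h0j hjN with heq | ⟨hz, hp⟩
  · rw [heq] at hne ⊢
    rw [pureV_hit _ _ _ _ _ _ _ hne]
  · rw [hp, hk, ← hf]

lemma cell_miss {dp0 : List (List Int)} {N : Int} {A : List Int} {c : Bool}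
    {dpc : List (List Int)} {i j : Int}
    (hinv : DpInv dp0 N A c dpc) (h0i : 0 ≤ i) (hiN : i < N) (h0j : 0 ≤ j) (hjN : j < N)
    (hmiss : cellD dpc i j = -1) : cellD dp0 i j = -1 := by
  rcases hinv.2 i j h0i hiN h0j hjN with heq | ⟨hz, _⟩
  · rw [← heq, hmiss]
  · exact hz

lemma dpInv_update {dp0 : List (List Int)} {N : Int} {A : List Int} {c : Bool}
    {dp1 : List (List Int)} {i j w : Int} {k : Nat}
    (hdp : N ≤ (dp0.length : Int))
    (hrows : ∀ row ∈ dp0.take N.toNat, N ≤ (row.length : Int))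
    (hinv : DpInv dp0 N A c dp1) (h0i : 0 ≤ i) (hiN : i < N) (h0j : 0 ≤ j) (hjN : j < N)
    (hz : cellD dp0 i j = -1) (hk : ((j - i) % N).toNat = k)
    (hval : w = pureV N A dp0 k i j (pvFlagAt c k)) :
    ∃ dp2, setCell dp1 i j w = some dp2 ∧ DpInv dp0 N A c dp2 := by
  obtain ⟨hsh, hcells⟩ := hinv
  have hlen : dp1.length = dp0.length := shape_len hsh
  have hrowlen : N ≤ ((dp1.getD i.toNat ([] : List Int)).length : Int) := by
    rw [shape_row_len hsh]
    exact row_len_ge N dp0 hdp hrows i.toNat (by omega)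
  obtain ⟨dp2, hset, hsh2, hcell2⟩ := setCell_spec dp1 i j w h0i (by omega) h0j (by omega)
  refine ⟨dp2, hset, hsh2.trans hsh, ?_⟩
  intro i' j' h0i' hiN' h0j' hjN'
  rw [hcell2 i' j' h0i' h0j']
  by_cases hij : i' = i ∧ j' = j
  · obtain ⟨rfl, rfl⟩ := hij
    right
    refine ⟨hz, ?_⟩
    rw [if_pos ⟨rfl, rfl⟩, hval, hk]
  · rw [if_neg hij]
    exact hcells i' j' h0i' hiN' h0j' hjN'

lemma dnat_shift {i j N : Int} {k : Nat} (hN : 0 < N)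
    (hk : ((j - i) % N).toNat = k + 1) :
    (((j - i - 1) % N).toNat) = k := by
  have h1 := Int.emod_nonneg (j - i) (show N ≠ 0 by omega)
  have h2 := Int.emod_lt_of_pos (j - i) hN
  have h3 : (j - i) % N = (k : Int) + 1 := by omega
  have h4 : (j - i - 1) % N = ((j - i) % N - 1) % N := by
    rw [Int.sub_emod ((j - i) % N) 1, emod_self_idem, ← Int.sub_emod]
  rw [h4, h3]
  have h5 : ((k : Int) + 1 - 1) = (k : Int) := by ring
  rw [h5, Int.emod_eq_of_lt (by omega) (by omega)]
  omega

lemma dnat_left {i j N : Int} {k : Nat} (hN : 0 < N)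
    (hk : ((j - i) % N).toNat = k + 1) :
    ((j - (i + 1) % N) % N).toNat = k := by
  have h : (j - (i + 1) % N) % N = (j - i - 1) % N := by
    rw [Int.sub_emod j ((i+1) % N), emod_self_idem, ← Int.sub_emod]
    congr 1; ring
  rw [h]; exact dnat_shift hN hk

lemma dnat_right {i j N : Int} {k : Nat} (hN : 0 < N)
    (hk : ((j - i) % N).toNat = k + 1) :
    (((j + N - 1) % N - i) % N).toNat = k := by
  have h : ((j + N - 1) % N - i) % N = (j - i - 1) % N := by
    rw [Int.sub_emod ((j + N - 1) % N) i, emod_self_idem, ← Int.sub_emod]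
    have h2 : j + N - 1 - i = (j - i - 1) + N * 1 := by ring
    rw [h2, Int.add_mul_emod_self_left]
  rw [h]; exact dnat_shift hN hk

lemma funcAux_eq (N : Int) (A : List Int) (dp0 : List (List Int)) (c : Bool)
    (hN : 0 < N) (hA : N ≤ (A.length : Int)) (hdp : N ≤ (dp0.length : Int))
    (hrows : ∀ row ∈ dp0.take N.toNat, N ≤ (row.length : Int)) :
    ∀ k : Nat, ∀ fuel : Nat, k < fuel → ∀ i j : Int, ∀ f : Bool, ∀ dpc : List (List Int),
      0 ≤ i → i < N → 0 ≤ j → j < N →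
      ((j - i) % N).toNat = k → f = pvFlagAt c k → DpInv dp0 N A c dpc →
      ∃ dp', funcAux fuel i j f N A dpc = some (pureV N A dp0 k i j f, dp') ∧ DpInv dp0 N A c dp' := by
  intro k
  induction k with
  | zero =>
    intro fuel hfuel i j f dpc h0i hiN h0j hjN hk hf hinv
    obtain ⟨fuel', rfl⟩ : ∃ m, fuel = m + 1 := ⟨fuel - 1, by omega⟩
    have hlen : dpc.length = dp0.length := shape_len hinv.1
    have hrowlen : N ≤ ((dpc.getD i.toNat ([] : List Int)).length : Int) := by
      rw [shape_row_len hinv.1]; exact row_len_ge N dp0 hdp hrows i.toNat (by omega)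
    have hr1 := read_row (dpc := dpc) i h0i (by omega)
    have hr2 := read_entry (row := dpc.getD i.toNat ([] : List Int)) j h0j (by omega)
    have hcd : cellD dpc i j = (dpc.getD i.toNat ([] : List Int)).getD j.toNat 0 :=
      cellD_eq_getD h0i h0j
    have hnn := Int.emod_nonneg (j - i) (show N ≠ 0 by omega)
    have hij : i = j := by
      have hz0 : (j - i) % N = 0 := by omega
      by_cases hle : i ≤ j
      · have := Int.emod_eq_of_lt (show 0 ≤ j - i by omega) (show j - i < N by omega)
        omega
      · have h5 : (j - i + N * 1) % N = (j - i) % N := Int.add_mul_emod_self_left _ _ _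
        have h6 : (j - i + N * 1) % N = j - i + N * 1 :=
          Int.emod_eq_of_lt (by omega) (by omega)
        omega
    subst hij
    rw [funcAux]
    simp only [hr1, hr2, ← hcd]
    by_cases hv : cellD dpc i i = -1
    · have hz := cell_miss hinv h0i hiN h0j hjN hv
      have hk0 : ((i - i) % N).toNat = 0 := by simp
      cases f with
      | true =>
        obtain ⟨dp2, hset, hinv2⟩ := dpInv_update hdp hrows hinv h0i hiN h0j hjN hz hk0
          (w := 0) (by rw [← hf]; simp [pureV, hz])
        refine ⟨dp2, ?_, hinv2⟩
        simp [hv, hset, pureV, hz]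
      | false =>
        obtain ⟨dp2, hset, hinv2⟩ := dpInv_update hdp hrows hinv h0i hiN h0j hjN hz hk0
          (w := PySem.List.pyGetD A i 0) (by rw [← hf]; simp [pureV, hz])
        refine ⟨dp2, ?_, hinv2⟩
        simp [hv, readA A N i h0i hiN hA, hset, pureV, hz]
    · refine ⟨dpc, ?_, hinv⟩
      have := cell_value_eq hinv h0i hiN h0j hjN hk hf hv
      simp [hv, ← this]
  | succ k ih =>
    intro fuel hfuel i j f dpc h0i hiN h0j hjN hk hf hinv
    obtain ⟨fuel', rfl⟩ : ∃ m, fuel = m + 1 := ⟨fuel - 1, by omega⟩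
    have hlen : dpc.length = dp0.length := shape_len hinv.1
    have hrowlen : N ≤ ((dpc.getD i.toNat ([] : List Int)).length : Int) := by
      rw [shape_row_len hinv.1]; exact row_len_ge N dp0 hdp hrows i.toNat (by omega)
    have hr1 := read_row (dpc := dpc) i h0i (by omega)
    have hr2 := read_entry (row := dpc.getD i.toNat ([] : List Int)) j h0j (by omega)
    have hcd : cellD dpc i j = (dpc.getD i.toNat ([] : List Int)).getD j.toNat 0 :=
      cellD_eq_getD h0i h0j
    have hnn := Int.emod_nonneg (j - i) (show N ≠ 0 by omega)
    have hmlt := Int.emod_lt_of_pos (j - i) hN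
    have hne : i ≠ j := by
      intro h; subst h; simp at hk
    rw [funcAux]
    simp only [hr1, hr2, ← hcd]
    by_cases hv : cellD dpc i j = -1
    · have hz := cell_miss hinv h0i hiN h0j hjN hv
      -- children indices and their facts
      have h0l : 0 ≤ (i + 1) % N := Int.emod_nonneg _ (show N ≠ 0 by omega)
      have hlN : (i + 1) % N < N := Int.emod_lt_of_pos _ hN
      have h0r : 0 ≤ (j + N - 1) % N := Int.emod_nonneg _ (show N ≠ 0 by omega)
      have hrN : (j + N - 1) % N < N := Int.emod_lt_of_pos _ hN
      have hdl := dnat_left hN hk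
      have hdr := dnat_right hN hk
      have hfs : pvFlagAt c (k + 1) = !(pvFlagAt c k) := pvFlagAt_succ c k
      cases f with
      | true =>
        -- IOI's turn: follow the larger end, child flag false
        have hcf : false = pvFlagAt c k := by
          rw [hfs] at hf
          cases h : pvFlagAt c k <;> simp [h] at hf ⊢
        obtain ⟨dp1, heq1, hinv1⟩ := ih fuel' (by omega) ((i + 1) % N) j false dpc
          h0l hlN h0j hjN hdl hcf hinv
        obtain ⟨dp1', heq1', hinv1'⟩ := ih fuel' (by omega) i ((j + N - 1) % N) false dpc
          h0i hiN h0r hrN hdr hcf hinv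
        by_cases hgt : PySem.List.pyGetD A i 0 > PySem.List.pyGetD A j 0
        · obtain ⟨dp2, hset, hinv2⟩ := dpInv_update hdp hrows hinv1 h0i hiN h0j hjN hz hk
            (w := pureV N A dp0 k ((i + 1) % N) j false)
            (by rw [← hf]; simp [pureV, hz, PySem.Int.mod_eq_emod_of_pos hN, hgt])
          refine ⟨dp2, ?_, hinv2⟩
          simp [hv, hne, readA A N i h0i hiN hA, readA A N j h0j hjN hA, hgt,
            mod?_pos _ _ hN, heq1, hset, pureV, hz, PySem.Int.mod_eq_emod_of_pos hN]
        · obtain ⟨dp2, hset, hinv2⟩ := dpInv_update hdp hrows hinv1' h0i hiN h0j hjN hz hk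
            (w := pureV N A dp0 k i ((j + N - 1) % N) false)
            (by rw [← hf]; simp [pureV, hz, PySem.Int.mod_eq_emod_of_pos hN, hgt])
          refine ⟨dp2, ?_, hinv2⟩
          simp [hv, hne, readA A N i h0i hiN hA, readA A N j h0j hjN hA, hgt,
            mod?_pos _ _ hN, heq1', hset, pureV, hz, PySem.Int.mod_eq_emod_of_pos hN]
      | false =>
        -- JOI's turn: both children with flag true, take the max
        have hcf : true = pvFlagAt c k := by
          rw [hfs] at hf
          cases h : pvFlagAt c k <;> simp [h] at hf ⊢
        obtain ⟨dp1, heq1, hinv1⟩ := ih fuel' (by omega) ((i + 1) % N) j true dpc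
          h0l hlN h0j hjN hdl hcf hinv
        obtain ⟨dp2, heq2, hinv2⟩ := ih fuel' (by omega) i ((j + N - 1) % N) true dp1
          h0i hiN h0r hrN hdr hcf hinv1
        obtain ⟨dp3, hset, hinv3⟩ := dpInv_update hdp hrows hinv2 h0i hiN h0j hjN hz hk
          (w := max (pureV N A dp0 k ((i + 1) % N) j true + PySem.List.pyGetD A i 0)
                    (pureV N A dp0 k i ((j + N - 1) % N) true + PySem.List.pyGetD A j 0))
          (by rw [← hf]; simp [pureV, hz, PySem.Int.mod_eq_emod_of_pos hN])
        refine ⟨dp3, ?_, hinv3⟩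
        simp [hv, hne, readA A N i h0i hiN hA, readA A N j h0j hjN hA,
          mod?_pos _ _ hN, heq1, heq2, hset, pureV, hz, PySem.Int.mod_eq_emod_of_pos hN]
    · refine ⟨dpc, ?_, hinv⟩
      have := cell_value_eq hinv h0i hiN h0j hjN hk hf hv
      simp [hv, ← this]

lemma funcAlt_eq (l r : Int) (flag : Bool) (N : Int) (A : List Int) (dp : List (List Int))
    (hN : 0 < N) (hl0 : 0 ≤ l) (hl : l < N) (hr0 : 0 ≤ r) (hr : r < N)
    (hm : cellD dp l r = -1) :
    func_alt l r flag N A dp = pureV N A dp (((r - l) % N).toNat) l r flag := by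
  have hmod : PySem.Int.mod (r-l) N = (r-l) % N := PySem.Int.mod_eq_emod_of_pos hN
  have hnn := Int.emod_nonneg (r - l) (show N ≠ 0 by omega)
  rw [func_alt]
  simp only [hm, hmod, ne_eq, not_true_eq_false, if_false]
  set d0 : Nat := ((r - l) % N).toNat with hd0def
  have hd0 : ((d0 : Nat) : Int) = (r - l) % N := by omega
  have hbase : (List.range (d0+1)).map (fun (s : Nat) =>
      let i := PySem.Int.mod (l + (s : Int)) N
      let m := cellD dp i i
      if m ≠ -1 then m else if (if d0 % 2 = 0 then flag else !flag) then 0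
      else PySem.List.pyGetD A i 0) = layerFun N A dp l r flag d0 d0 := by
    unfold layerFun
    apply List.map_congr_left
    intro s hs
    have hs' : s ≤ d0 := by simpa [Nat.lt_succ_iff] using hs
    have hidx : (r - ((d0 : Int) - (s : Int))) % N = (l + (s : Int)) % N := by
      rw [Int.emod_eq_emod_iff_emod_sub_eq_zero]
      have he : r - ((d0 : Int) - (s : Int)) - (l + (s : Int)) = (r - l) - ((r-l) % N) := by
        rw [hd0]; ring
      rw [he, Int.emod_def (r - l) N]
      have he2 : r - l - (r - l - N * ((r-l) / N)) = N * ((r-l)/N) := by ring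
      rw [he2, Int.mul_emod_right]
    simp only [PySem.Int.mod_eq_emod_of_pos hN, hidx]
    have hzero : d0 - d0 = 0 := by omega
    rw [hzero, pureV, pvFlagAt]
  rw [hbase, show (if d0 % 2 = 0 then flag else !flag) = pvFlagAt flag d0 from rfl]
  rw [downLoop_eq N A dp l r flag hN d0 d0 le_rfl]
  unfold layerFun
  simp only [Nat.zero_add, List.range_one, List.map_cons, List.map_nil, List.getD_cons_zero]
  have h1 : (l + ((0:Nat) : Int)) % N = l := by
    simpa using Int.emod_eq_of_lt hl0 hl
  have h2 : (r - (((0:Nat) : Int) - ((0:Nat) : Int))) % N = r := by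
    simpa using Int.emod_eq_of_lt hr0 hr
  rw [h1, h2, show pvFlagAt flag 0 = flag from rfl, Nat.sub_zero]

lemma pvFlagAt_invol (f : Bool) (t : Nat) : pvFlagAt (pvFlagAt f t) t = f := by
  unfold pvFlagAt; split <;> simp

lemma dpInv_refl (dp0 : List (List Int)) (N : Int) (A : List Int) (c : Bool) :
    DpInv dp0 N A c dp0 :=
  ⟨rfl, fun _ _ _ _ _ _ => Or.inl rfl⟩

lemma memo_hit_eq (l r : Int) (flag : Bool) (N : Int) (A : List Int) (dp : List (List Int))
    (row : List Int) (v : Int) (hrow : PySem.List.pyGet? dp l = some row)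
    (hv : PySem.List.pyGet? row r = some v) (hne : v ≠ -1) :
    func l r flag N A dp = v ∧ func_alt l r flag N A dp = v := by
  have hc : cellD dp l r = v := by
    simp [cellD, PySem.List.pyGetD, hrow, hv]
  constructor
  · rw [func]
    have hsplit : 2 * N.natAbs + dp.length + 8 = (2 * N.natAbs + dp.length + 7) + 1 := by omega
    have : funcAux (2 * N.natAbs + dp.length + 8) l r flag N A dp = some (v, dp) := by
      rw [hsplit, funcAux]
      simp [hrow, hv, hne]
    rw [this]
  · rw [func_alt]
    simp [hc, hne]

-- ===== VERDICT (by name: the statement is the Claim_ definition above) =====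
theorem func_spec : Claim_equal_func := by
  intro l r flag N A dp _ hpre
  unfold Spec_func
  rcases hpre with hhit | ⟨hN, hl0, hl, hr0, hr, hA, hdp, hrows⟩
  · -- the queried cell is a filled memo cell: both return it
    rcases hq : PySem.List.pyGet? dp l with _ | row
    · simp [hq] at hhit
    rcases hq2 : PySem.List.pyGet? row r with _ | v
    · simp [hq, hq2] at hhit
    have hne : v ≠ -1 := by simpa [hq, hq2] using hhit
    obtain ⟨h1, h2⟩ := memo_hit_eq l r flag N A dp row v hq hq2 hne
    rw [h1, h2]
  · -- natural domain
    have hrowl : PySem.List.pyGet? dp l = some (dp[l.toNat]'(by omega)) := by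
      rw [pyGet?_nonneg _ _ hl0]
      exact List.getElem?_eq_getElem (by omega)
    have hmem : dp[l.toNat]'(by omega) ∈ dp.take N.toNat := by
      have h1 : l.toNat < (dp.take N.toNat).length := by
        rw [List.length_take]; omega
      have h2 : (dp.take N.toNat)[l.toNat]'h1 = dp[l.toNat]'(by omega) := by
        rw [List.getElem_take]
      rw [← h2]
      exact List.getElem_mem _
    by_cases hm : cellD dp l r = -1
    · -- memo miss: A computes pureV via the invariant, B via the bottom-up fill
      have h1 := Int.emod_lt_of_pos (r - l) hN
      have h2 := Int.emod_nonneg (r - l) (show N ≠ 0 by omega)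
      set k : Nat := ((r - l) % N).toNat with hk
      have hkN : k < N.toNat := by omega
      obtain ⟨dp', heq, _⟩ := funcAux_eq N A dp (pvFlagAt flag k) hN hA hdp hrows k
        (2 * N.natAbs + dp.length + 8) (by omega) l r flag dp hl0 hl hr0 hr rfl
        (by rw [pvFlagAt_invol]) (dpInv_refl dp N A (pvFlagAt flag k))
      rw [func, heq, funcAlt_eq l r flag N A dp hN hl0 hl hr0 hr hm]
    · -- memo hit inside the natural domain
      have hrowlen : N ≤ ((dp[l.toNat]'(by omega)).length : Int) := hrows _ hmem
      have hvr : PySem.List.pyGet? (dp[l.toNat]'(by omega)) r =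
          some ((dp[l.toNat]'(by omega))[r.toNat]'(by omega)) := by
        rw [pyGet?_nonneg _ _ hr0]
        exact List.getElem?_eq_getElem (by omega)
      have hcv : cellD dp l r = (dp[l.toNat]'(by omega))[r.toNat]'(by omega) := by
        simp [cellD, PySem.List.pyGetD, hrowl, hvr]
      obtain ⟨h1, h2⟩ := memo_hit_eq l r flag N A dp _ _ hrowl hvr (by rw [← hcv]; exact hm)
      rw [h1, h2]
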